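-- pv_equiv track=rewrite | github.com/Nyhazzy/coding_test | 프로그래머스/1/42840. 모의고사/모의고사.py | solution
-- ===== SOURCE A (Python) =====
-- def solution(answers):
--     supo1 = [1,2,3,4,5]
--     supo2 = [2,1,2,3,2,4,2,5]
--     supo3 = [3,3,1,1,2,2,4,4,5,5]
--
--     # 각 수포자들이 맞춘 답 개수 저장
--     score = [0,0,0]
--
--     for i in range(len(answers)):
--         if answers[i] == supo1[i % len(supo1)]:
--             score[0] += 1
--         if answers[i] == supo2[i % len(supo2)]:
--             score[1] += 1
--         if answers[i] == supo3[i % len(supo3)]: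
--             score[2] += 1
--
--     result = [i+1 for i, s in enumerate(score) if s == max(score)]
--
--     return result
-- ===== SOURCE B (Python) =====
-- def solution(answers):
--     patterns = [[1, 2, 3, 4, 5],
--                 [2, 1, 2, 3, 2, 4, 2, 5],
--                 [3, 3, 1, 1, 2, 2, 4, 4, 5, 5]]
--     # One pass over answers builds a histogram keyed by (position mod 40, answer),
--     # 40 being the lcm of the three pattern lengths; each guesser's score is then
--     # read off the histogram with 40 lookups, without rescanning the answers.
--     cnt = {}
--     for i, a in enumerate(answers):
--         key = (i % 40, a)
--         cnt[key] = cnt.get(key, 0) + 1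
--     score = [sum(cnt.get((j, p[j % len(p)]), 0) for j in range(40)) for p in patterns]
--     best = max(score)
--     return [k + 1 for k, s in enumerate(score) if s == best]
-- ===== Notes on version B (the rewrite author's own statement) =====
-- stated objective: alternative
-- what changed: Instead of A's fused per-index loop that compares every answer against all three cyclic patterns, B makes a single pass building a histogram keyed by (index mod 40, answer) (40 = lcm of the pattern lengths) and then computes each guesser's score from 40 histogram lookups, never comparing answers to patterns element-by-element.
import Mathlib
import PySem

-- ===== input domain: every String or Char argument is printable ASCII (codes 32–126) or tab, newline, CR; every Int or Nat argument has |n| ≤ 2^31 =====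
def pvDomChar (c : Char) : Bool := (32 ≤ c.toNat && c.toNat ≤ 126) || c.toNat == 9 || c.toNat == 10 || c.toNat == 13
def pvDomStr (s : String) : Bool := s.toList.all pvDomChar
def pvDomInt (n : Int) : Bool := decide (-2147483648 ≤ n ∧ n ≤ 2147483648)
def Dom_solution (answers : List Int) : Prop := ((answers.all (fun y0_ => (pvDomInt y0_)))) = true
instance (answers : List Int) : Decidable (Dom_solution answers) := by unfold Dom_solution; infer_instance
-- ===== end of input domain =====

-- B replaces A's fused per-index comparison loop by a one-pass histogram keyed by
-- (index mod 40, answer) and 40 lookups per guesser (objective: alternative; same return value).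


-- ===== PORT A =====
-- A's mutable 3-element score list is kept as a triple (slot 0, slot 1, slot 2);
-- each range(len(answers)) iteration does the three independent `if` updates in A's order.
def pvStepA (answers supo1 supo2 supo3 : List Int) (sc : Int × Int × Int) (i : Nat) :
    Int × Int × Int :=
  let sc := if answers.getD i 0 = supo1.getD (i % supo1.length) 0 then
      (sc.1 + 1, sc.2.1, sc.2.2) else sc
  let sc := if answers.getD i 0 = supo2.getD (i % supo2.length) 0 then
      (sc.1, sc.2.1 + 1, sc.2.2) else sc
  if answers.getD i 0 = supo3.getD (i % supo3.length) 0 then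
      (sc.1, sc.2.1, sc.2.2 + 1) else sc

def solution (answers : List Int) : List Int :=
  let supo1 : List Int := [1, 2, 3, 4, 5]
  let supo2 : List Int := [2, 1, 2, 3, 2, 4, 2, 5]
  let supo3 : List Int := [3, 3, 1, 1, 2, 2, 4, 4, 5, 5]
  let score := (List.range answers.length).foldl (pvStepA answers supo1 supo2 supo3) (0, 0, 0)
  let scoreL : List Int := [score.1, score.2.1, score.2.2]
  let m := max score.1 (max score.2.1 score.2.2)   -- max(score) on the 3-element list
  (PySem.List.enumerate scoreL).filterMap (fun is => if is.2 = m then some (is.1 + 1) else none)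

-- ===== PORT B =====
-- the histogram loop: cnt[(i % 40, a)] = cnt.get((i % 40, a), 0) + 1 over enumerate(answers)
-- (i ≥ 0 here, so Python's `%` agrees with Lean's `%` on Int for the positive divisor 40)
def pvHist (answers : List Int) : PySem.Dict (Int × Int) Int :=
  (PySem.List.enumerate answers).foldl
    (fun d e => d.insert (e.1 % 40, e.2) (d.getD (e.1 % 40, e.2) 0 + 1)) PySem.Dict.empty

-- sum(cnt.get((j, p[j % len(p)]), 0) for j in range(40)); 0 ≤ j % len(p) < len(p), so pyGetD is exact
def pvScore (cnt : PySem.Dict (Int × Int) Int) (p : List Int) : Int :=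
  (PySem.List.pyRange 0 40 1).foldl
    (fun s j => s + cnt.getD (j, PySem.List.pyGetD p (j % PySem.List.len p) 0) 0) 0

def solution_alt (answers : List Int) : List Int :=
  let patterns : List (List Int) :=
    [[1, 2, 3, 4, 5], [2, 1, 2, 3, 2, 4, 2, 5], [3, 3, 1, 1, 2, 2, 4, 4, 5, 5]]
  let cnt := pvHist answers
  let score := patterns.map (pvScore cnt)
  let best := score.foldl max (score.getD 0 0)     -- max(score)
  (PySem.List.enumerate score).filterMap (fun is => if is.2 = best then some (is.1 + 1) else none)

-- ===== PRECONDITION & SPEC =====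
def Spec_solution (answers : List Int) (out : List Int) : Prop := out = solution_alt answers
instance (answers : List Int) (out : List Int) : Decidable (Spec_solution answers out) := by unfold Spec_solution; infer_instance

-- ===== CLAIM (what is proved, stated in full; the proofs are below) =====
def Claim_equal_solution : Prop := ∀ (answers : List Int), Dom_solution answers → Spec_solution answers (solution answers)

-- ===== LEMMAS AND PROOFS =====

-- A's fused fold splits into three independent per-pattern counting folds.
theorem foldA_split (answers s1 s2 s3 : List Int) (L : List Nat) (a b c : Int) :
    L.foldl (pvStepA answers s1 s2 s3) (a, b, c) =
      (L.foldl (fun acc i => if answers.getD i 0 = s1.getD (i % s1.length) 0 then acc + 1 else acc) a,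
       L.foldl (fun acc i => if answers.getD i 0 = s2.getD (i % s2.length) 0 then acc + 1 else acc) b,
       L.foldl (fun acc i => if answers.getD i 0 = s3.getD (i % s3.length) 0 then acc + 1 else acc) c) := by
  induction L generalizing a b c with
  | nil => simp
  | cons i L ih =>
    simp only [List.foldl_cons]
    rw [show pvStepA answers s1 s2 s3 (a, b, c) i =
        ((if answers.getD i 0 = s1.getD (i % s1.length) 0 then a + 1 else a),
         (if answers.getD i 0 = s2.getD (i % s2.length) 0 then b + 1 else b),
         (if answers.getD i 0 = s3.getD (i % s3.length) 0 then c + 1 else c)) by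
      unfold pvStepA; split_ifs <;> simp]
    exact ih _ _ _

-- list sum over List.range = Finset sum over Finset.range
theorem listsum_range (m : Nat) (F : Nat -> Int) :
    ((List.range m).map F).sum = ∑ j ∈ Finset.range m, F j := by
  induction m with
  | zero => simp
  | succ m ih => rw [List.range_succ, Finset.sum_range_succ]; simp [ih]

-- a counting-into-a-dict loop over computed keys, read back with getD
theorem foldl_insert_key {α κ : Type} [BEq κ] [LawfulBEq κ] (l : List α) (key : α -> κ)
    (d : PySem.Dict κ Int) (q : κ) :
    (l.foldl (fun d x => d.insert (key x) (d.getD (key x) 0 + 1)) d).getD q 0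
      = d.getD q 0 + ((l.map key).count q : Nat) := by
  have h := PySem.Dict.getD_foldl_insert_add_one (l.map key) d q
  rw [List.foldl_map] at h
  exact h

-- the key list of the histogram, written over List.range
theorem keys_eq (answers : List Int) :
    (PySem.List.enumerate answers).map (fun e => (e.1 % 40, e.2)) =
      (List.range answers.length).map (fun k => (((k % 40 : Nat) : Int), answers.getD k 0)) := by
  rw [PySem.List.enumerate_eq_map_pyRange answers 0,
      show PySem.List.len answers = ((answers.length : Nat) : Int) by simp,
      PySem.List.pyRange_zero, Int.toNat_natCast, List.map_map, List.map_map]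
  apply List.map_congr_left
  intro k _
  simp only [Function.comp]
  rw [PySem.List.pyGetD_natCast]
  refine Prod.ext ?_ rfl
  simp

-- the histogram's getD is a count over that key list
theorem pvHist_getD (answers : List Int) (q : Int × Int) :
    (pvHist answers).getD q 0 =
      ((((List.range answers.length).map
          (fun k => (((k % 40 : Nat) : Int), answers.getD k 0))).count q : Nat) : Int) := by
  unfold pvHist
  rw [foldl_insert_key (PySem.List.enumerate answers) (fun e => (e.1 % 40, e.2))]
  rw [keys_eq]
  simp

-- bucket partition: summing, over all buckets j < m, the count of elements whose
-- key (f x, g x) equals (j, v j) recovers the plain count of {x : g x = v (f x)}.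
theorem bucket {α : Type} (l : List α) (f : α -> Nat) (g : α -> Int) (v : Nat -> Int) (m : Nat)
    (hf : ∀ x ∈ l, f x < m) :
    (∑ j ∈ Finset.range m,
        ((l.countP (fun x => ((f x : Int), g x) == ((j : Int), v j)) : Nat) : Int)) =
      ((l.countP (fun x => g x == v (f x)) : Nat) : Int) := by
  induction l with
  | nil => simp
  | cons x l ih =>
    have hx : f x < m := hf x (List.mem_cons_self ..)
    have hl : ∀ y ∈ l, f y < m := fun y hy => hf y (List.mem_cons_of_mem _ hy)
    simp only [List.countP_cons]
    push_cast
    rw [Finset.sum_add_distrib, ih hl]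
    have key : (∑ j ∈ Finset.range m,
        (if ((f x : Int), g x) == ((j : Int), v j) then (1 : Int) else 0)) =
        (if g x == v (f x) then (1 : Int) else 0) := by
      have hrw : ∀ j : Nat, (if ((f x : Int), g x) == ((j : Int), v j) then (1 : Int) else 0) =
          (if j = f x then (if g x == v (f x) then (1 : Int) else 0) else 0) := by
        intro j
        by_cases hj : j = f x
        · subst hj; simp [Prod.ext_iff]
        · have hne : ¬ (((f x : Int), g x) = ((j : Int), v j)) := by
            simp only [Prod.ext_iff]
            intro ⟨h1, _⟩
            exact hj (by exact_mod_cast h1.symm)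
          simp [hj, hne]
      rw [Finset.sum_congr rfl (fun j _ => hrw j),
          Finset.sum_ite_eq' (Finset.range m) (f x)]
      simp [hx]
    rw [key]

-- per-pattern: B's histogram score equals A's direct match count
theorem score_eq (answers p : List Int) (hL : p.length ∣ 40) :
    pvScore (pvHist answers) p =
      (List.range answers.length).foldl
        (fun acc i => if answers.getD i 0 = p.getD (i % p.length) 0 then acc + 1 else acc) 0 := by
  rw [PySem.List.foldl_ite_add_one (fun i => answers.getD i 0 = p.getD (i % p.length) 0)]
  unfold pvScore
  rw [PySem.List.foldl_add (PySem.List.pyRange 0 40 1)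
    (fun j => (pvHist answers).getD (j, PySem.List.pyGetD p (j % PySem.List.len p) 0) 0) 0]
  rw [show PySem.List.pyRange 0 40 1 = List.map (fun (k : Nat) => (k : Int)) (List.range 40) by decide]
  rw [List.map_map]
  rw [listsum_range 40
    ((fun j => (pvHist answers).getD (j, PySem.List.pyGetD p (j % PySem.List.len p) 0) 0) ∘
      (fun (k : Nat) => (k : Int)))]
  simp only [Function.comp]
  have hq : ∀ j : Nat, ((pvHist answers).getD
        ((j : Int), PySem.List.pyGetD p ((j : Int) % PySem.List.len p) 0) 0) =
      (((List.range answers.length).countP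
          (fun k => ((((k % 40 : Nat)) : Int), answers.getD k 0) ==
            ((j : Int), p.getD (j % p.length) 0)) : Nat) : Int) := by
    intro j
    rw [show ((j : Int) % PySem.List.len p) = (((j % p.length : Nat)) : Int) by
        simp]
    rw [PySem.List.pyGetD_natCast, pvHist_getD, List.count_eq_countP, List.countP_map]
    rfl
  rw [Finset.sum_congr rfl (fun j _ => hq j)]
  rw [bucket (List.range answers.length) (fun k => k % 40) (fun k => answers.getD k 0)
      (fun j => p.getD (j % p.length) 0) 40
      (fun k _ => Nat.mod_lt _ (by norm_num))]
  have hcount : (List.range answers.length).countP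
        (fun x => answers.getD x 0 == p.getD (x % 40 % p.length) 0) =
      (List.range answers.length).countP
        (fun x => decide (answers.getD x 0 = p.getD (x % p.length) 0)) := by
    apply List.countP_congr
    intro k _
    have hmod : k % 40 % p.length = k % p.length := Nat.mod_mod_of_dvd k hL
    simp [hmod]
  rw [hcount]

-- max of a 3-element literal list by Python's running max
theorem max3 (a b c : Int) :
    [a, b, c].foldl max ([a, b, c].getD 0 0) = max a (max b c) := by
  simp [max_assoc]

-- ===== VERDICT (by name: the statement is the Claim_ definition above) =====
theorem solution_spec : Claim_equal_solution := by
  intro answers _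
  show solution answers = solution_alt answers
  have h1 := score_eq answers [1, 2, 3, 4, 5] (by norm_num)
  have h2 := score_eq answers [2, 1, 2, 3, 2, 4, 2, 5] (by norm_num)
  have h3 := score_eq answers [3, 3, 1, 1, 2, 2, 4, 4, 5, 5] (by norm_num)
  simp only [solution, solution_alt, List.map_cons, List.map_nil, foldA_split, h1, h2, h3, max3]
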